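-- pv_equiv track=rewrite | github.com/Timo4ey/my-leetcode | medium/equal-row-and-column-pairs_2352.py | rotateLeft
-- ===== SOURCE A (Python) =====
-- def rotateLeft(matrix: list[list[int]]):
--     height = len(matrix[0])
--     width = len(matrix)
--     res = []
--     for col in range(height):
--         res.append([0] * width)
--         for row in range(width):
--             res[col][width - row - 1] = matrix[row][height - col - 1]
--         res[col].reverse()
--     return res
-- ===== SOURCE B (Python) =====
-- def rotateLeft(matrix: list[list[int]]):
--     width = len(matrix[0])
--     rows = [list(r[:width]) for r in matrix]
--     res = []
--     while rows[0]:
--         res.append([r.pop() for r in rows])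
--     return res
-- ===== Notes on version B (the rewrite author's own statement) =====
-- stated objective: alternative
-- what changed: Replaces A's preallocated zero rows with per-cell reversed-index writes and a final in-place reverse per row by destructive column peeling: copy the rows (truncated to the matrix width), then repeatedly pop the last element of every row, so each pass emits one output row directly in final order with no index arithmetic and no reversal.
import Mathlib
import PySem

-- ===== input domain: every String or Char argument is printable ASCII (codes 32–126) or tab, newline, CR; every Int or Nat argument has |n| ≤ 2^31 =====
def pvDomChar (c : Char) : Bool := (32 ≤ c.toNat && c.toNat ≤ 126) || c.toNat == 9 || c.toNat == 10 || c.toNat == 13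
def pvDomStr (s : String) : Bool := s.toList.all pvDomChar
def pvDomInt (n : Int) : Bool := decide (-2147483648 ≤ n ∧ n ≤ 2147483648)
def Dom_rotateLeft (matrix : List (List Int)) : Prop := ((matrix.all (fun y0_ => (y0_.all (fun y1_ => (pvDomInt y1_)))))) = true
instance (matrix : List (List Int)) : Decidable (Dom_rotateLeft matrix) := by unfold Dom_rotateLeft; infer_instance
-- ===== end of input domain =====

-- B replaces A's preallocated rows + reversed-index writes + per-row reverse by destructive
-- column peeling: copy the rows truncated to the matrix width, then repeatedly pop the last
-- element of every row, emitting each output row directly in final order (alternative, same cost).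
-- A mutates only its local `res`, so the return-value equivalence is the whole story.

-- ===== PORT A =====
-- Literal port of A. `res.append(...)` then mutation of `res[col]` (the freshly appended
-- last row) then `res[col].reverse()` is transliterated as building that row locally and
-- appending its final value.  `len(matrix[0])` raises on [] (excluded by Pre_); the port
-- totalizes it with getD.  Element reads/writes use the total pyGetD/pySetD forms, exact
-- under Pre_ (all indices in range there).
def rotateLeft (matrix : List (List Int)) : List (List Int) :=
  let height : Int := (((PySem.List.pyGet? matrix 0).getD []).length : Int)
  let width : Int := (matrix.length : Int)
  (PySem.List.pyRange 0 height 1).foldl (fun res col =>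
    let cur := List.replicate matrix.length (0 : Int)
    let cur := (PySem.List.pyRange 0 width 1).foldl (fun cur row =>
      PySem.List.pySetD cur (width - row - 1)
        (PySem.List.pyGetD (PySem.List.pyGetD matrix row []) (height - col - 1) 0)) cur
    res ++ [cur.reverse]) []

-- ===== PORT B =====
-- the while loop: `while rows[0]: res.append([r.pop() for r in rows])`; the fuel is the
-- width of the (truncated) rows, which is exactly the number of iterations the loop makes.
-- r.pop() yields the last element (getLastD) and leaves r.dropLast.
def peelCols : Nat → List (List Int) → List (List Int)
  | 0, _ => []
  | n + 1, rows =>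
    if (rows.headD []).isEmpty then []
    else (rows.map (fun r => r.getLastD 0)) :: peelCols n (rows.map List.dropLast)

def rotateLeft_alt (matrix : List (List Int)) : List (List Int) :=
  let width := (matrix.headD []).length                                   -- len(matrix[0])
  let rows := matrix.map (fun r => PySem.List.slice r none (some (width : Int)))  -- [list(r[:width]) …]
  peelCols width rows

-- ===== PRECONDITION & SPEC =====
-- Pre_ excludes exactly the inputs on which A raises IndexError: the empty matrix
-- (len(matrix[0])) and ragged matrices with some row shorter than the first row
-- (the read matrix[row][height-col-1]).
def Pre_rotateLeft (matrix : List (List Int)) : Prop :=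
  matrix ≠ [] ∧ ∀ r ∈ matrix, (matrix.headD []).length ≤ r.length
instance (matrix : List (List Int)) : Decidable (Pre_rotateLeft matrix) := by
  unfold Pre_rotateLeft; infer_instance

def pvWitness_rotateLeft : List (List Int) := [[1, 2], [3, 4], [5, 6]]

def Spec_rotateLeft (matrix : List (List Int)) (out : List (List Int)) : Prop := out = rotateLeft_alt matrix
instance (matrix : List (List Int)) (out : List (List Int)) : Decidable (Spec_rotateLeft matrix out) := by unfold Spec_rotateLeft; infer_instance

-- ===== CLAIM (what is proved, stated in full; the proofs are below) =====
def Claim_equal_rotateLeft : Prop := ∀ (matrix : List (List Int)), Dom_rotateLeft matrix → Pre_rotateLeft matrix → Spec_rotateLeft matrix (rotateLeft matrix)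

-- ===== LEMMAS AND PROOFS =====

-- mapping over a list = mapping over its indices
theorem map_eq_map_range {β : Type} (g : List Int → β) (m : List (List Int)) :
    m.map g = (List.range m.length).map (fun r => g (m.getD r [])) := by
  apply List.ext_getElem
  · simp
  · intro i h1 h2
    simp [List.getD_eq_getElem?_getD, List.getElem?_eq_getElem (by simpa using h2)]

-- B's peeling on equal-length nonempty rows is the list of columns, right to left
theorem peelCols_eq (n : Nat) (rows : List (List Int)) (hne : rows ≠ [])
    (h : ∀ r ∈ rows, r.length = n) :
    peelCols n rows = (List.range n).map (fun c => rows.map (fun r => r.getD (n - 1 - c) 0)) := by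
  induction n generalizing rows with
  | zero => simp [peelCols]
  | succ k ih =>
    have hhead : rows.head?.getD [] ≠ [] := by
      cases rows with
      | nil => exact absurd rfl hne
      | cons a t =>
        have ha := h a (by simp)
        intro hx
        simp only [List.head?_cons, Option.getD_some] at hx
        rw [hx] at ha
        simp at ha
    rw [peelCols, if_neg (by simpa using hhead), ih (rows.map List.dropLast) (by simpa using hne) ?_,
      List.range_succ_eq_map]
    · simp only [List.map_cons, List.map_map]
      congr 1
      · apply List.map_congr_left
        intro r hr
        have hl := h r hr
        rw [List.getLastD_eq_getLast?, List.getLast?_eq_getElem?,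
          List.getElem?_eq_getElem (by omega), List.getD_eq_getElem?_getD,
          List.getElem?_eq_getElem (by omega)]
        simp only [Option.getD_some]
        congr 1
        omega
      · apply List.map_congr_left
        intro j hj
        simp only [List.mem_range] at hj
        apply List.map_congr_left
        intro r hr
        have hl := h r hr
        simp only [Function.comp]
        rw [List.getD_eq_getElem?_getD, List.getD_eq_getElem?_getD,
          List.getElem?_dropLast, if_pos (by simp [hl]; omega)]
        congr 2
        omega
    · intro r hr
      simp only [List.mem_map] at hr
      obtain ⟨s, hs, rfl⟩ := hr
      have := h s hs
      simp [List.length_dropLast, this]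

-- A's inner loop: after k steps the last k positions hold f in reversed order
theorem inner_fill (f : Nat → Int) (w : Nat) (s : List Int) (hs : s.length = w) :
    ∀ k : Nat, k ≤ w →
    (List.range k).foldl (fun cur r => cur.set (w - 1 - r) (f r)) s
      = s.take (w - k) ++ ((List.range k).map f).reverse := by
  intro k
  induction k with
  | zero => intro _; simp [← hs]
  | succ j ih =>
    intro hk
    have hjw : j < w := by omega
    rw [List.range_succ, List.foldl_append, ih (by omega)]
    simp only [List.foldl_cons, List.foldl_nil]
    have hlen : (s.take (w - j)).length = w - j := by
      simp only [List.length_take, hs]; omega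
    rw [List.set_append_left _ _ (by omega)]
    rw [List.set_eq_take_append_cons_drop, if_pos (by omega)]
    rw [List.take_take, List.drop_eq_nil_of_le (by omega)]
    rw [List.map_append, List.reverse_append]
    simp only [List.map_cons, List.map_nil, List.reverse_cons, List.reverse_nil,
      List.nil_append, List.cons_append, List.append_assoc]
    congr 2
    omega

-- the canonical form A's port reaches
theorem portA_eq (matrix : List (List Int)) (hne : matrix ≠ []) :
    rotateLeft matrix
      = (List.range (matrix.headD []).length).map (fun c =>
          (List.range matrix.length).map (fun r =>
            (matrix.getD r []).getD ((matrix.headD []).length - 1 - c) 0)) := by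
  have hget0 : (PySem.List.pyGet? matrix 0).getD [] = matrix.headD [] := by
    cases matrix with
    | nil => exact absurd rfl hne
    | cons a t => rw [PySem.List.pyGet?_zero_cons]; rfl
  simp only [rotateLeft, hget0, PySem.List.pyRange_zero_nat, List.foldl_map,
    PySem.List.foldl_append_singleton_eq_map, List.nil_append]
  apply List.map_congr_left
  intro c hc
  simp only [List.mem_range] at hc
  rw [PySem.List.foldl_congr_mem (List.range matrix.length) _
        (fun (cur : List Int) (r : Nat) =>
          cur.set (matrix.length - 1 - r)
            ((matrix.getD r []).getD ((matrix.headD []).length - 1 - c) 0)) _ ?_]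
  · rw [inner_fill _ matrix.length _ (by simp) matrix.length le_rfl]
    simp
  · intro cur r hr
    simp only [List.mem_range] at hr
    have e1 : (matrix.length : Int) - (r : Int) - 1
        = ((matrix.length - 1 - r : Nat) : Int) := by omega
    have e2 : ((matrix.headD []).length : Int) - (c : Int) - 1
        = (((matrix.headD []).length - 1 - c : Nat) : Int) := by omega
    rw [e1, e2, PySem.List.pySetD_natCast, PySem.List.pyGetD_natCast,
      PySem.List.pyGetD_natCast]

-- B's port reaches the same canonical form
theorem portB_eq (matrix : List (List Int)) (hpre : Pre_rotateLeft matrix) :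
    rotateLeft_alt matrix
      = (List.range (matrix.headD []).length).map (fun c =>
          (List.range matrix.length).map (fun r =>
            (matrix.getD r []).getD ((matrix.headD []).length - 1 - c) 0)) := by
  unfold rotateLeft_alt
  have hsl : ∀ r : List Int, PySem.List.slice r none (some (((matrix.headD []).length : Nat) : Int))
      = r.take (matrix.headD []).length := fun r => PySem.List.slice_to_natCast r _
  simp only [hsl]
  rw [peelCols_eq _ _ (by simpa using hpre.1) ?_]
  · apply List.map_congr_left
    intro c hc
    simp only [List.mem_range] at hc
    rw [map_eq_map_range (fun r => r.getD ((matrix.headD []).length - 1 - c) 0)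
      (matrix.map (fun r => r.take (matrix.headD []).length))]
    simp only [List.length_map]
    apply List.map_congr_left
    intro r hr
    simp only [List.mem_range] at hr
    have hlen : (matrix.headD []).length ≤ matrix[r].length := hpre.2 _ (List.getElem_mem hr)
    simp only [List.getD_eq_getElem?_getD, List.getElem?_map,
      List.getElem?_eq_getElem hr, Option.map_some, Option.getD_some]
    rw [List.getElem?_eq_getElem (by simp only [List.length_take]; omega),
      List.getElem?_eq_getElem (by omega)]
    simp only [Option.getD_some, List.getElem_take]
  · intro r hr
    simp only [List.mem_map] at hr
    obtain ⟨s, hs, rfl⟩ := hr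
    have := hpre.2 s hs
    simp only [List.length_take, List.headD_eq_head?_getD] at this ⊢
    omega

-- ===== VERDICT (by name: the statement is the Claim_ definition above) =====
theorem rotateLeft_spec : Claim_equal_rotateLeft := by
  intro matrix _ hpre
  unfold Spec_rotateLeft
  rw [portA_eq matrix hpre.1, portB_eq matrix hpre]
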